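-- pv_equiv track=rewrite | github.com/tn3w/is-crawler | is_crawler/detection.py | _compat_name_span
-- ===== SOURCE A (Python) =====
-- _NAME_CHARS = frozenset(
--     "abcdefghijklmnopqrstuvwxyzABCDEFGHIJKLMNOPQRSTUVWXYZ0123456789_.-"
-- )
--
-- def _name_chars_end(s: str, start: int) -> int:
--     j = start
--     while j < len(s) and s[j] in _NAME_CHARS:
--         j += 1
--     return j
--
-- def _compat_name_span(ua: str) -> tuple[int, int] | None:
--     i = ua.lower().find("(compatible;")
--     if i == -1:
--         return None
--
--     j = i + len("(compatible;")
--     while j < len(ua) and ua[j] == " ":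
--         j += 1
--
--     if j >= len(ua) or not ua[j].isalpha():
--         return None
--
--     return j, _name_chars_end(ua, j)
-- ===== SOURCE B (Python) =====
-- _NAME_CHARS = frozenset(
--     "abcdefghijklmnopqrstuvwxyzABCDEFGHIJKLMNOPQRSTUVWXYZ0123456789_.-"
-- )
--
-- _MARKER = "(compatible;"
--
--
-- def _compat_name_span(ua: str):
--     # Single left-to-right pass with a small automaton: states 0..11 count the
--     # marker characters matched so far (case-insensitively; the marker's opening
--     # parenthesis occurs nowhere else in it, so on a mismatch a match can only
--     # restart where that character reappears), state 12 skips spaces, state 13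
--     # consumes the name token.
--     state = 0
--     start = 0
--     for idx, c in enumerate(ua):
--         if state < 12:
--             cl = c.lower()
--             if cl == _MARKER[state]:
--                 state += 1
--             elif cl == "(":
--                 state = 1
--             else:
--                 state = 0
--         elif state == 12:
--             if c == " ":
--                 pass
--             elif c.isalpha():
--                 start = idx
--                 state = 13
--             else:
--                 return None
--         elif c not in _NAME_CHARS:
--             return start, idx
--     if state == 13:
--         return start, len(ua)
--     return None
-- ===== Notes on version B (the rewrite author's own statement) =====
-- stated objective: alternative
-- what changed: Replaces A's library substring search plus two separate index-tracking while-loops with a single left-to-right pass of an explicit 14-state automaton (marker matching exploits that the marker's opening parenthesis occurs nowhere else in it; then space-skipping and name-consuming states).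
import Mathlib
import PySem

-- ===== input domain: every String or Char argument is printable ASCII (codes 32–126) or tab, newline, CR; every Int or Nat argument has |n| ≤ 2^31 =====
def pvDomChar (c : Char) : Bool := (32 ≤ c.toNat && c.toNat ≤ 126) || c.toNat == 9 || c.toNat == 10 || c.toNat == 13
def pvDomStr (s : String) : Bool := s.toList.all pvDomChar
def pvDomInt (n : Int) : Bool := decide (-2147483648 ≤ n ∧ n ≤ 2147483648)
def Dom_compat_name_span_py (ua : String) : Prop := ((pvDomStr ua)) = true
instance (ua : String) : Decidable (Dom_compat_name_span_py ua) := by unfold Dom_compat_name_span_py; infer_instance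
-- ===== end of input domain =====

-- B replaces A's find-then-scan (library substring search, then two index-tracking
-- while-loops) by one left-to-right pass of a 14-state automaton; objective: alternative (same asymptotic cost).

-- ===== PORT A =====

-- _NAME_CHARS
def pvNameChars : List Char :=
  "abcdefghijklmnopqrstuvwxyzABCDEFGHIJKLMNOPQRSTUVWXYZ0123456789_.-".toList

-- _name_chars_end: while j < len(s) and s[j] in _NAME_CHARS: j += 1
def pvNameCharsEnd (s : List Char) (j : Nat) : Nat :=
  if h : j < s.length then
    if s[j] ∈ pvNameChars then pvNameCharsEnd s (j + 1) else j
  else j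
  termination_by s.length - j

-- the space-skipping loop: while j < len(ua) and ua[j] == " ": j += 1
def pvSkipSpaces (s : List Char) (j : Nat) : Nat :=
  if h : j < s.length then
    if s[j] = ' ' then pvSkipSpaces s (j + 1) else j
  else j
  termination_by s.length - j

def compat_name_span_py (ua : String) : Option (Int × Int) :=
  let s := ua.toList
  let i := PySem.Str.find (PySem.Str.lower ua) "(compatible;"
  if i = -1 then none
  else
    let j := pvSkipSpaces s (i.toNat + 12)
    if h : j < s.length then
      if PySem.Chars.strIsalpha [s[j]] then
        some ((j : Int), (pvNameCharsEnd s j : Int))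
      else none
    else none

-- ===== PORT B =====

-- _MARKER
def pvMarker : List Char := "(compatible;".toList

-- the automaton loop: state 0..11 = marker chars matched (case-insensitively),
-- 12 = skipping spaces, 13 = inside the name token; start = name start index
def pvStep : List Char → Nat → Nat → Nat → Option (Int × Int)
  | [], idx, state, start =>
    if state = 13 then some ((start : Int), (idx : Int)) else none
  | c :: rest, idx, state, start =>
    if state < 12 then
      let cl := PySem.Chars.lowerChar c
      pvStep rest (idx + 1)
        (if cl = pvMarker.getD state ' ' then state + 1
         else if cl = '(' then 1 else 0) start
    else if state = 12 then
      if c = ' ' then pvStep rest (idx + 1) 12 start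
      else if PySem.Chars.isalpha c then pvStep rest (idx + 1) 13 idx
      else none
    else
      if c ∈ pvNameChars then pvStep rest (idx + 1) 13 start
      else some ((start : Int), (idx : Int))

def compat_name_span_py_alt (ua : String) : Option (Int × Int) :=
  pvStep ua.toList 0 0 0

-- ===== PRECONDITION & SPEC =====
def Spec_compat_name_span_py (ua : String) (out : Option (Int × Int)) : Prop := out = compat_name_span_py_alt ua
instance (ua : String) (out : Option (Int × Int)) : Decidable (Spec_compat_name_span_py ua out) := by unfold Spec_compat_name_span_py; infer_instance

-- ===== CLAIM (what is proved, stated in full; the proofs are below) =====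
def Claim_equal_compat_name_span_py : Prop := ∀ (ua : String), Dom_compat_name_span_py ua → Spec_compat_name_span_py ua (compat_name_span_py ua)

-- ===== LEMMAS AND PROOFS =====

-- first index (in the lowercased text) at which the marker occurs
def pvFindSpec : List Char → Option Nat
  | [] => none
  | c :: t =>
    if pvMarker <+: (c :: t).map PySem.Chars.lowerChar then some 0
    else (pvFindSpec t).map (· + 1)

-- what the automaton computes once the marker phase is resolved by pvFindSpec
def pvRhs (t : List Char) (idx : Nat) : Option (Int × Int) :=
  match pvFindSpec t with
  | none => none
  | some n => pvStep (t.drop (n + 12)) (idx + (n + 12)) 12 0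

-- leading run of name characters
def pvNameLen : List Char → Nat
  | [] => 0
  | c :: rest => if c ∈ pvNameChars then pvNameLen rest + 1 else 0

-- local description of the tail phase (skip spaces, alpha guard, name run)
def pvTail2 : List Char → Nat → Option (Int × Int)
  | [], _ => none
  | c :: u', j =>
    if PySem.Chars.isalpha c then some ((j : Int), ((j + 1 + pvNameLen u' : Nat) : Int))
    else none

def pvTailSpec (t : List Char) (idx : Nat) : Option (Int × Int) :=
  pvTail2 (t.dropWhile (· == ' ')) (idx + (t.length - (t.dropWhile (· == ' ')).length))

theorem pvMarker_length : pvMarker.length = 12 := by decide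

theorem pvMarker_getD_ne_paren : ∀ m, m < 12 → 1 ≤ m → pvMarker.getD m ' ' ≠ '(' := by decide

theorem pvMarker_drop_cons (m : Nat) (hm : m < 12) :
    pvMarker.drop m = pvMarker.getD m ' ' :: pvMarker.drop (m + 1) := by
  rw [List.drop_eq_getElem_cons (by rw [pvMarker_length]; exact hm),
    List.getD_eq_getElem _ _ (by rw [pvMarker_length]; exact hm)]

theorem pvMarker_cons : pvMarker = '(' :: pvMarker.drop 1 := by decide

theorem pv_alpha_mem (c : Char) (h : PySem.Chars.isalpha c = true) : c ∈ pvNameChars := by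
  have hrange : c.toNat < 123 := by
    have h' := h
    simp only [PySem.Chars.isalpha, PySem.Chars.isupper, PySem.Chars.islower,
      Bool.or_eq_true, Bool.and_eq_true, decide_eq_true_eq] at h'
    rcases h' with ⟨_, h2⟩ | ⟨_, h2⟩
    · have h3 := UInt32.le_iff_toNat_le.mp (Char.le_def.mp h2)
      have h4 : ('Z'.val).toNat = 90 := by decide
      rw [h4] at h3
      simp only [Char.toNat]
      omega
    · have h3 := UInt32.le_iff_toNat_le.mp (Char.le_def.mp h2)
      have h4 : ('z'.val).toNat = 122 := by decide
      rw [h4] at h3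
      simp only [Char.toNat]
      omega
  have hall : ∀ n, n < 123 →
      (PySem.Chars.isalpha (Char.ofNat n) = true → Char.ofNat n ∈ pvNameChars) := by decide
  have h3 := hall c.toNat hrange
  rw [Char.ofNat_toNat] at h3
  exact h3 h

theorem pvFindSpec_none (t : List Char) (h : pvFindSpec t = none) :
    ∀ j, ¬ pvMarker <+: (t.map PySem.Chars.lowerChar).drop j := by
  induction t with
  | nil =>
    intro j hp
    have := List.prefix_nil.mp (by simpa using hp)
    exact absurd this (by decide)
  | cons c t ih =>
    intro j hp
    rw [pvFindSpec] at h
    by_cases h0 : pvMarker <+: (c :: t).map PySem.Chars.lowerChar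
    · rw [if_pos h0] at h
      exact absurd h (by simp)
    · rw [if_neg h0] at h
      have ht : pvFindSpec t = none := Option.map_eq_none_iff.mp h
      cases j with
      | zero => exact h0 (by simpa using hp)
      | succ j => exact ih ht j (by simpa using hp)

theorem pvFindSpec_some (t : List Char) (n : Nat) (h : pvFindSpec t = some n) :
    pvMarker <+: (t.map PySem.Chars.lowerChar).drop n ∧
      ∀ i, i < n → ¬ pvMarker <+: (t.map PySem.Chars.lowerChar).drop i := by
  induction t generalizing n with
  | nil => simp [pvFindSpec] at h
  | cons c t ih =>
    rw [pvFindSpec] at h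
    split_ifs at h with h0
    · cases h
      exact ⟨by simpa using h0, by omega⟩
    · cases hft : pvFindSpec t with
      | none => rw [hft] at h; simp at h
      | some m =>
        rw [hft] at h
        simp only [Option.map_some, Option.some.injEq] at h
        subst h
        obtain ⟨h1, h2⟩ := ih m hft
        refine ⟨by simpa using h1, ?_⟩
        intro i hi
        cases i with
        | zero => simpa using h0
        | succ i => simpa using h2 i (by omega)

theorem pv_find_bridge (s : List Char) :
    PySem.Chars.find (s.map PySem.Chars.lowerChar) pvMarker =
      (match pvFindSpec s with
       | none => (-1 : Int)
       | some n => (n : Int)) := by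
  cases hfs : pvFindSpec s with
  | none =>
    have hninf : ¬ pvMarker <:+: s.map PySem.Chars.lowerChar := by
      intro hinf
      have hIn : PySem.Chars.isIn pvMarker (s.map PySem.Chars.lowerChar) = true :=
        (PySem.Chars.isIn_iff_infix _ _).mpr hinf
      obtain ⟨j, hj⟩ := (PySem.Chars.exists_prefix_drop_iff_isIn _ _).mpr hIn
      exact pvFindSpec_none s hfs j hj
    exact (PySem.Chars.find_eq_neg_one_iff _ _).mpr hninf
  | some n =>
    obtain ⟨h1, h2⟩ := pvFindSpec_some s n hfs
    have hinf : pvMarker <:+: s.map PySem.Chars.lowerChar :=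
      (PySem.Chars.isIn_iff_infix _ _).mp
        ((PySem.Chars.exists_prefix_drop_iff_isIn _ _).mp ⟨n, h1⟩)
    have hnn : 0 ≤ PySem.Chars.find (s.map PySem.Chars.lowerChar) pvMarker :=
      (PySem.Chars.find_nonneg_iff _ _).mpr hinf
    obtain ⟨hf1, hf2⟩ := PySem.Chars.find_spec hnn
    have heq : (PySem.Chars.find (s.map PySem.Chars.lowerChar) pvMarker).toNat = n := by
      by_contra hne
      rcases Nat.lt_or_ge (PySem.Chars.find (s.map PySem.Chars.lowerChar) pvMarker).toNat n with hlt | hge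
      · exact h2 _ hlt hf1
      · exact hf2 n (by omega) h1
    show PySem.Chars.find (s.map PySem.Chars.lowerChar) pvMarker = (n : Int)
    omega

theorem pvRhs_eq_of_prefix (t : List Char) (idx : Nat)
    (h : pvMarker <+: t.map PySem.Chars.lowerChar) :
    pvRhs t idx = pvStep (t.drop 12) (idx + 12) 12 0 := by
  cases t with
  | nil =>
    have := List.prefix_nil.mp (by simpa using h)
    exact absurd this (by decide)
  | cons c t =>
    unfold pvRhs
    rw [pvFindSpec, if_pos h]

theorem pvRhs_cons (c : Char) (rest : List Char) (idx : Nat)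
    (h : ¬ pvMarker <+: (c :: rest).map PySem.Chars.lowerChar) :
    pvRhs (c :: rest) idx = pvRhs rest (idx + 1) := by
  unfold pvRhs
  rw [pvFindSpec, if_neg h]
  cases hft : pvFindSpec rest with
  | none => rfl
  | some n =>
    simp only [Option.map_some]
    have h1 : n + 1 + 12 = (n + 12) + 1 := by omega
    have h2 : idx + (n + 1 + 12) = idx + 1 + (n + 12) := by omega
    rw [h1, h2, List.drop_succ_cons]

theorem pvLaux (t : List Char) : ∀ m idx, m < 12 →
    pvStep t idx m 0 =
      if pvMarker.drop m <+: t.map PySem.Chars.lowerChar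
      then pvStep (t.drop (12 - m)) (idx + (12 - m)) 12 0
      else pvRhs t idx := by
  induction t with
  | nil =>
    intro m idx hm
    have hne : ¬ pvMarker.drop m <+: ([] : List Char).map PySem.Chars.lowerChar := by
      intro hp
      have h0 : pvMarker.drop m = [] := List.prefix_nil.mp (by simpa using hp)
      have h1 := congrArg List.length h0
      rw [List.length_drop, pvMarker_length] at h1
      simp at h1
      omega
    rw [if_neg hne, pvStep, if_neg (by omega)]
    rfl
  | cons c rest ih =>
    intro m idx hm
    have hstep : pvStep (c :: rest) idx m 0 =
        pvStep rest (idx + 1)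
          (if PySem.Chars.lowerChar c = pvMarker.getD m ' ' then m + 1
           else if PySem.Chars.lowerChar c = '(' then 1 else 0) 0 := by
      rw [pvStep, if_pos hm]
    have hmap : (c :: rest).map PySem.Chars.lowerChar =
        PySem.Chars.lowerChar c :: rest.map PySem.Chars.lowerChar := rfl
    have hdropm := pvMarker_drop_cons m hm
    by_cases hc : PySem.Chars.lowerChar c = pvMarker.getD m ' '
    · rw [hstep, if_pos hc]
      by_cases hm1 : m + 1 = 12
      · -- the marker is completed by this character
        have hdrop11 : pvMarker.drop (m + 1) = [] := by
          apply List.drop_eq_nil_of_le; rw [pvMarker_length]; omega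
        have hpre : pvMarker.drop m <+: (c :: rest).map PySem.Chars.lowerChar := by
          rw [hdropm, hdrop11, hmap]
          exact (List.cons_prefix_cons).mpr ⟨hc.symm, List.nil_prefix⟩
        rw [if_pos hpre, hm1]
        have h12 : 12 - m = 1 := by omega
        rw [h12]
        rfl
      · -- still inside the marker
        rw [ih (m + 1) (idx + 1) (by omega)]
        by_cases hp : pvMarker.drop (m + 1) <+: rest.map PySem.Chars.lowerChar
        · rw [if_pos hp]
          have hpre : pvMarker.drop m <+: (c :: rest).map PySem.Chars.lowerChar := by
            rw [hdropm, hmap]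
            exact (List.cons_prefix_cons).mpr ⟨hc.symm, hp⟩
          rw [if_pos hpre]
          have h1 : 12 - m = (12 - (m + 1)) + 1 := by omega
          have h2 : idx + ((12 - (m + 1)) + 1) = idx + 1 + (12 - (m + 1)) := by omega
          rw [h1, h2, List.drop_succ_cons]
        · rw [if_neg hp]
          have hnpre : ¬ pvMarker.drop m <+: (c :: rest).map PySem.Chars.lowerChar := by
            rw [hdropm, hmap]
            intro hcon
            exact hp ((List.cons_prefix_cons).mp hcon).2
          rw [if_neg hnpre]
          -- no occurrence can start at this position either
          have hnfull : ¬ pvMarker <+: (c :: rest).map PySem.Chars.lowerChar := by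
            rw [hmap, pvMarker_cons]
            intro hcon
            obtain ⟨hhead, htail⟩ := (List.cons_prefix_cons).mp hcon
            rcases Nat.eq_zero_or_pos m with hm0 | hmpos
            · subst hm0; exact hp htail
            · exact pvMarker_getD_ne_paren m hm hmpos ((hhead.trans hc).symm)
          rw [pvRhs_cons c rest idx hnfull]
    · rw [hstep, if_neg hc]
      have hnpre : ¬ pvMarker.drop m <+: (c :: rest).map PySem.Chars.lowerChar := by
        rw [hdropm, hmap]
        intro hcon
        exact hc ((List.cons_prefix_cons).mp hcon).1.symm
      rw [if_neg hnpre]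
      by_cases hparen : PySem.Chars.lowerChar c = '('
      · -- restart: this character could begin a new marker occurrence
        rw [if_pos hparen, ih 1 (idx + 1) (by omega)]
        by_cases hp1 : pvMarker.drop 1 <+: rest.map PySem.Chars.lowerChar
        · rw [if_pos hp1]
          have hfull : pvMarker <+: (c :: rest).map PySem.Chars.lowerChar := by
            rw [hmap, pvMarker_cons]
            exact (List.cons_prefix_cons).mpr ⟨hparen.symm, hp1⟩
          rw [pvRhs_eq_of_prefix _ _ hfull]
          have h2 : idx + 12 = idx + 1 + (12 - 1) := by omega
          rw [h2]
          rfl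
        · rw [if_neg hp1]
          have hnfull : ¬ pvMarker <+: (c :: rest).map PySem.Chars.lowerChar := by
            rw [hmap, pvMarker_cons]
            intro hcon
            exact hp1 ((List.cons_prefix_cons).mp hcon).2
          rw [pvRhs_cons c rest idx hnfull]
      · rw [if_neg hparen, ih 0 (idx + 1) (by omega)]
        have hnfull : ¬ pvMarker <+: (c :: rest).map PySem.Chars.lowerChar := by
          rw [hmap, pvMarker_cons]
          intro hcon
          exact hparen (((List.cons_prefix_cons).mp hcon).1.symm)
        rw [pvRhs_cons c rest idx hnfull]
        by_cases hp : pvMarker <+: rest.map PySem.Chars.lowerChar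
        · rw [if_pos (by simpa using hp), pvRhs_eq_of_prefix rest (idx + 1) hp]
        · rw [if_neg (by simpa using hp)]

theorem pvStep_zero_eq_pvRhs (t : List Char) (idx : Nat) :
    pvStep t idx 0 0 = pvRhs t idx := by
  rw [pvLaux t 0 idx (by omega)]
  by_cases hp : pvMarker <+: t.map PySem.Chars.lowerChar
  · rw [if_pos (by simpa using hp), pvRhs_eq_of_prefix t idx hp]
  · rw [if_neg (by simpa using hp)]

theorem pvStep13_spec (t : List Char) : ∀ idx st, pvStep t idx 13 st =
    some ((st : Int), ((idx + pvNameLen t : Nat) : Int)) := by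
  induction t with
  | nil => intro idx st; simp [pvStep, pvNameLen]
  | cons c rest ih =>
    intro idx st
    rw [pvStep, if_neg (by omega), if_neg (by omega)]
    by_cases hc : c ∈ pvNameChars
    · rw [if_pos hc, ih (idx + 1) st, pvNameLen, if_pos hc]
      congr 2
      omega
    · rw [if_neg hc, pvNameLen, if_neg hc]
      simp

theorem pvStep12_spec (t : List Char) : ∀ idx, pvStep t idx 12 0 = pvTailSpec t idx := by
  induction t with
  | nil => intro idx; rfl
  | cons c rest ih =>
    intro idx
    rw [pvStep, if_neg (by omega), if_pos rfl]
    by_cases hsp : c = ' '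
    · rw [if_pos hsp, ih (idx + 1)]
      unfold pvTailSpec
      subst hsp
      rw [List.dropWhile_cons_of_pos (by simp)]
      congr 1
      have hle := List.length_dropWhile_le (p := (· == ' ')) (l := rest)
      simp only [List.length_cons]
      omega
    · rw [if_neg hsp]
      unfold pvTailSpec
      rw [List.dropWhile_cons_of_neg (by simpa using hsp)]
      by_cases ha : PySem.Chars.isalpha c = true
      · rw [if_pos ha, pvStep13_spec rest (idx + 1) idx]
        simp only [pvTail2, if_pos ha, List.length_cons, Nat.sub_self, Nat.add_zero]
      · rw [if_neg ha]
        simp only [pvTail2, if_neg ha]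

-- A's tail (skip spaces from k, alpha guard, name run) equals pvTailSpec on s.drop k
theorem pvSkipSpaces_spec (s : List Char) (j : Nat) (hj : j ≤ s.length) :
    pvSkipSpaces s j = s.length - ((s.drop j).dropWhile (· == ' ')).length ∧
    s.drop (pvSkipSpaces s j) = (s.drop j).dropWhile (· == ' ') := by
  induction j using pvSkipSpaces.induct (s := s) with
  | case1 j h hsp ih =>
    rw [pvSkipSpaces, dif_pos h, if_pos hsp]
    have hd : s.drop j = s[j] :: s.drop (j + 1) := List.drop_eq_getElem_cons h
    rw [hd, hsp]
    simpa using ih h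
  | case2 j h hsp =>
    rw [pvSkipSpaces, dif_pos h, if_neg hsp]
    have hd : s.drop j = s[j] :: s.drop (j + 1) := List.drop_eq_getElem_cons h
    rw [hd, List.dropWhile_cons_of_neg (by simpa using hsp), ← hd]
    refine ⟨?_, rfl⟩
    have := List.length_drop (l := s) (i := j)
    omega
  | case3 j h =>
    rw [pvSkipSpaces, dif_neg h]
    have hj' : j = s.length := by omega
    subst hj'
    simp

theorem pvNameCharsEnd_spec (s : List Char) (j : Nat) (hj : j ≤ s.length) :
    pvNameCharsEnd s j = j + pvNameLen (s.drop j) := by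
  induction j using pvNameCharsEnd.induct (s := s) with
  | case1 j h hm ih =>
    rw [pvNameCharsEnd, dif_pos h, if_pos hm]
    have hd : s.drop j = s[j] :: s.drop (j + 1) := List.drop_eq_getElem_cons h
    rw [hd, pvNameLen, if_pos hm, ih h]
    omega
  | case2 j h hm =>
    rw [pvNameCharsEnd, dif_pos h, if_neg hm]
    have hd : s.drop j = s[j] :: s.drop (j + 1) := List.drop_eq_getElem_cons h
    rw [hd, pvNameLen, if_neg hm]
    omega
  | case3 j h =>
    rw [pvNameCharsEnd, dif_neg h]
    have hj' : j = s.length := by omega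
    subst hj'
    simp [pvNameLen]

theorem pvSkipSpaces_ge (s : List Char) (j : Nat) : j ≤ pvSkipSpaces s j := by
  induction j using pvSkipSpaces.induct (s := s) with
  | case1 j h hsp ih => rw [pvSkipSpaces, dif_pos h, if_pos hsp]; omega
  | case2 j h hsp => rw [pvSkipSpaces, dif_pos h, if_neg hsp]
  | case3 j h => rw [pvSkipSpaces, dif_neg h]

theorem pvTail_eq (s : List Char) (k : Nat) (hk : k ≤ s.length) :
    (if h : pvSkipSpaces s k < s.length then
       if PySem.Chars.strIsalpha [s[pvSkipSpaces s k]] then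
         some ((pvSkipSpaces s k : Int), (pvNameCharsEnd s (pvSkipSpaces s k) : Int))
       else none
     else none)
    = pvTailSpec (s.drop k) k := by
  obtain ⟨hlen, hdrop⟩ := pvSkipSpaces_spec s k hk
  unfold pvTailSpec
  cases hm : (s.drop k).dropWhile (· == ' ') with
  | nil =>
    rw [hm] at hlen hdrop
    have hje : pvSkipSpaces s k = s.length := by
      have := List.drop_eq_nil_iff.mp hdrop
      have := pvSkipSpaces_ge s k
      omega
    rw [dif_neg (by omega)]
    rfl
  | cons c u' =>
    rw [hm] at hlen hdrop
    have hlt : pvSkipSpaces s k < s.length := by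
      by_contra hge
      have : s.drop (pvSkipSpaces s k) = [] := List.drop_eq_nil_of_le (by omega)
      rw [this] at hdrop; exact absurd hdrop (by simp)
    have hsj : s[pvSkipSpaces s k]'hlt = c := by
      have h0 : s[pvSkipSpaces s k]'hlt =
          (s.drop (pvSkipSpaces s k)).head (by simp [hdrop]) := (List.head_drop _).symm
      rw [h0]
      simp [hdrop]
    rw [dif_pos hlt, hsj]
    have hone : PySem.Chars.strIsalpha [c] = PySem.Chars.isalpha c := by
      simp [PySem.Chars.strIsalpha]
    rw [hone]
    have hlen' : u'.length + 1 ≤ s.length - k := by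
      have h1 := List.length_dropWhile_le (p := (· == ' ')) (l := s.drop k)
      rw [hm] at h1
      have h2 := List.length_drop (l := s) (i := k)
      simp at h1
      omega
    have hlenc : (c :: u').length = u'.length + 1 := by simp
    rw [hlenc] at hlen
    by_cases ha : PySem.Chars.isalpha c = true
    · rw [if_pos ha]
      simp only [pvTail2, if_pos ha]
      have hcmem : c ∈ pvNameChars := pv_alpha_mem c ha
      have hend : pvNameCharsEnd s (pvSkipSpaces s k) =
          pvSkipSpaces s k + pvNameLen (c :: u') := by
        rw [pvNameCharsEnd_spec s _ (le_of_lt hlt), hdrop]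
      refine congrArg some (Prod.ext ?_ ?_) <;> simp only [List.length_drop]
      · omega
      · rw [hend, pvNameLen, if_pos hcmem]
        omega
    · rw [if_neg ha]
      simp only [pvTail2, if_neg ha]

-- ===== VERDICT (by name: the statement is the Claim_ definition above) =====
theorem compat_name_span_py_spec : Claim_equal_compat_name_span_py := by
  intro ua _
  unfold Spec_compat_name_span_py compat_name_span_py compat_name_span_py_alt
  simp only []
  have h1 : PySem.Str.find (PySem.Str.lower ua) "(compatible;" =
      PySem.Chars.find (ua.toList.map PySem.Chars.lowerChar) pvMarker := by
    simp [pysem]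
    rfl
  cases hfs : pvFindSpec ua.toList with
  | none =>
    have hfind : PySem.Str.find (PySem.Str.lower ua) "(compatible;" = -1 := by
      rw [h1, pv_find_bridge, hfs]
    have hrhs : pvRhs ua.toList 0 = none := by
      unfold pvRhs; rw [hfs]
    rw [hfind, if_pos rfl, pvStep_zero_eq_pvRhs, hrhs]
  | some n =>
    have hfind : PySem.Str.find (PySem.Str.lower ua) "(compatible;" = (n : Int) := by
      rw [h1, pv_find_bridge, hfs]
    have hrhs : pvRhs ua.toList 0 = pvStep (ua.toList.drop (n + 12)) (0 + (n + 12)) 12 0 := by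
      unfold pvRhs; rw [hfs]
    have hbound : n + 12 ≤ ua.toList.length := by
      obtain ⟨hp1, _⟩ := pvFindSpec_some ua.toList n hfs
      have h2 := List.IsPrefix.length_le hp1
      rw [List.length_drop, List.length_map, pvMarker_length] at h2
      omega
    have htn : ((n : Int)).toNat + 12 = n + 12 := by simp
    rw [hfind, if_neg (by omega), pvStep_zero_eq_pvRhs, hrhs, pvStep12_spec, htn,
      pvTail_eq ua.toList (n + 12) hbound]
    norm_num
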